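-- pv_equiv track=rewrite | github.com/miliar/Code_Jam_Webscraper | solutions_python/solutions_year16_round0_nr3/1188.py | as_base
-- ===== SOURCE A (Python) =====
-- def as_base(n, k, bn):
-- 	dn = 0
-- 	ns = 1
-- 	for i in range(0,bn):
-- 		if n & (1 << i) > 0:
-- 			dn += ns
-- 		ns *= k
-- 	return dn
-- ===== SOURCE B (Python) =====
-- def as_base(n, k, bn):
--     # Horner's method over the bits of n, most-significant first:
--     # one accumulator multiplied by k each step; no explicit powers of k.
--     dn = 0
--     for i in reversed(range(bn)):
--         dn = dn * k + ((n >> i) & 1)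
--     return dn
-- ===== Notes on version B (the rewrite author's own statement) =====
-- stated objective: idiomatic
-- what changed: Replaced the low-to-high scan that maintains an explicit running power ns = k^i with Horner's method over the bits from most significant to least: a single accumulator multiplied by k each step, no powers computed or kept.
import Mathlib
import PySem

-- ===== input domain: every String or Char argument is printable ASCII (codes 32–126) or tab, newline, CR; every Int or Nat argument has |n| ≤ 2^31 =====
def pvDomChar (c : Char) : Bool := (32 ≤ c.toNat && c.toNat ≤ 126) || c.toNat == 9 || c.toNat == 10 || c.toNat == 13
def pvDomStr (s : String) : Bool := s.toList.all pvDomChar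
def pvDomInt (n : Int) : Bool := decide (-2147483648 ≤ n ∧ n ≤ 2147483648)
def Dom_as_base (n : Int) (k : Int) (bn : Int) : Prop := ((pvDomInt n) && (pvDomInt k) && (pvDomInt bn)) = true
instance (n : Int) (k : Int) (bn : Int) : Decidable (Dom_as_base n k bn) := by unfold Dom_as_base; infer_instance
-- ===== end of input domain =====

-- B replaces A's running-power accumulator with Horner's method over the bits, most significant first (idiomatic; same cost).

-- ===== PORT A =====
-- Loop state (dn, ns); `n & (1 << i) > 0` is `0 < PySem.Int.band n ((1:Int) <<< i.toNat)`
-- (exact: every i produced by range(0, bn) is nonnegative, so i.toNat = i).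
def as_base (n : Int) (k : Int) (bn : Int) : Int :=
  ((PySem.List.pyRange 0 bn 1).foldl
    (fun (st : Int × Int) (i : Int) =>
      (if (0:Int) < PySem.Int.band n ((1:Int) <<< i.toNat) then st.1 + st.2 else st.1, st.2 * k))
    (0, 1)).1

-- ===== PORT B =====
-- `(n >> i) & 1` (exact: i ≥ 0 inside reversed(range(bn)), so i.toNat = i)
def pyBit (n : Int) (i : Nat) : Int := PySem.Int.band (n >>> i) 1

def as_base_alt (n : Int) (k : Int) (bn : Int) : Int :=
  ((PySem.List.pyRange 0 bn 1).reverse).foldl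
    (fun (dn : Int) (i : Int) => dn * k + pyBit n i.toNat) 0

-- ===== PRECONDITION & SPEC =====
def Spec_as_base (n : Int) (k : Int) (bn : Int) (out : Int) : Prop := out = as_base_alt n k bn
instance (n : Int) (k : Int) (bn : Int) (out : Int) : Decidable (Spec_as_base n k bn out) := by unfold Spec_as_base; infer_instance

-- ===== CLAIM (what is proved, stated in full; the proofs are below) =====
def Claim_equal_as_base : Prop := ∀ (n : Int) (k : Int) (bn : Int), Dom_as_base n k bn → Spec_as_base n k bn (as_base n k bn)

-- ===== LEMMAS AND PROOFS =====

lemma bit_zero_or_one (n : Int) (i : Nat) : pyBit n i = 0 ∨ pyBit n i = 1 := by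
  unfold pyBit
  have h := PySem.Int.band_one (n >>> i)
  have h0 := PySem.Int.mod_nonneg (n >>> i) (b := 2) (by norm_num)
  have h2 := PySem.Int.mod_lt (n >>> i) (b := 2) (by norm_num)
  omega

-- Euclidean division of -(m+1) by a power of two, in terms of Nat division of m
lemma ediv_neg_eq (m i : Nat) :
    (-(m : Int) - 1) / (2 ^ i : Int) = -((m / 2 ^ i : Nat) : Int) - 1 := by
  have hpos : (0 : Int) < (2 ^ i : Int) := by positivity
  have hdm : (2 : Int) ^ i * ((m / 2 ^ i : Nat) : Int) + ((m % 2 ^ i : Nat) : Int) = (m : Int) := by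
    exact_mod_cast Nat.div_add_mod m (2 ^ i)
  have hlt : ((m % 2 ^ i : Nat) : Int) < (2 : Int) ^ i := by
    exact_mod_cast Nat.mod_lt m (y := 2 ^ i) (by positivity)
  have hge : (0 : Int) ≤ ((m % 2 ^ i : Nat) : Int) := by positivity
  have h := (Int.ediv_emod_unique (a := -(m : Int) - 1) (b := (2 ^ i : Int))
      (q := -((m / 2 ^ i : Nat) : Int) - 1)
      (r := (2 ^ i : Int) - 1 - ((m % 2 ^ i : Nat) : Int)) hpos).mpr ?_
  · exact h.1
  · exact ⟨by linear_combination -hdm, by omega, by omega⟩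

-- A's loop condition reads exactly B's bit
lemma cond_iff_bit (n : Int) (i : Nat) :
    ((0:Int) < PySem.Int.band n ((1:Int) <<< i)) ↔ pyBit n i = 1 := by
  have hc : (((2 ^ i : Nat) : Int)) = (2 : Int) ^ i := by push_cast; ring
  have hsl : ((1 : Int) <<< i) = ((2 ^ i : Nat) : Int) := by
    rw [hc]; simpa using Int.shiftLeft_eq 1 i
  have hpow : (0 : Int) ≤ ((2 ^ i : Nat) : Int) := Int.natCast_nonneg _
  have hp1 : (1 : Int) ≤ ((2 ^ i : Nat) : Int) := by
    exact_mod_cast Nat.one_le_two_pow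
  have hsr : n >>> i = n / (2 ^ i : Int) := by
    simpa using Int.shiftRight_eq_div_pow n i
  have hbit : pyBit n i = (n >>> i) % 2 := by
    unfold pyBit
    rw [PySem.Int.band_one, PySem.Int.mod_eq_emod_of_pos (by norm_num)]
  rw [hsl, hbit, hsr]
  by_cases hn : 0 ≤ n
  · -- nonnegative n: reduce everything to Nat
    obtain ⟨m, rfl⟩ := Int.eq_ofNat_of_zero_le hn
    have hband : PySem.Int.band (m : Int) ((2 ^ i : Nat) : Int) = ((m &&& 2 ^ i : Nat) : Int) := by
      rw [PySem.Int.band_of_nonneg hn hpow, Int.toNat_natCast, Int.toNat_natCast]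
    have hdiv : ((m : Int)) / ((2 ^ i : Int)) = ((m / 2 ^ i : Nat) : Int) := by
      rw [← hc]
      exact_mod_cast Int.ofNat_ediv_ofNat (a := m) (b := 2 ^ i)
    rw [hband, Nat.and_two_pow, hdiv]
    have ht := @Nat.testBit_eq_decide_div_mod_eq i m
    cases htb : m.testBit i
    · rw [htb] at ht; simp at ht
      simp only [Bool.toNat_false, Nat.zero_mul, Nat.cast_zero]
      omega
    · rw [htb] at ht; simp at ht
      simp only [Bool.toNat_true, Nat.one_mul]
      omega
  · -- negative n: write n = -(m+1) and use the bits of m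
    obtain ⟨m, hm⟩ : ∃ m : Nat, n = -(m : Int) - 1 := ⟨(-n - 1).toNat, by omega⟩
    subst hm
    have hband : PySem.Int.band (-(m : Int) - 1) ((2 ^ i : Nat) : Int)
        = ((2 ^ i - (2 ^ i &&& m) : Nat) : Int) := by
      rw [PySem.Int.band]
      have h1 : ¬ (0 : Int) ≤ -(m : Int) - 1 := by omega
      rw [if_neg h1, if_pos hpow]
      have h3 : (-(-(m : Int) - 1) - 1) = (m : Int) := by ring
      rw [h3, Int.toNat_natCast, Int.toNat_natCast]
    rw [hband, Nat.two_pow_and, ediv_neg_eq]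
    have ht := @Nat.testBit_eq_decide_div_mod_eq i m
    cases htb : m.testBit i
    · rw [htb] at ht; simp at ht
      simp only [Bool.toNat_false, Nat.mul_zero, Nat.sub_zero]
      omega
    · rw [htb] at ht; simp at ht
      simp only [Bool.toNat_true, Nat.mul_one, Nat.sub_self, Nat.cast_zero]
      omega

-- loop invariant: A's fold equals d + s * (Horner value of the remaining bit positions)
lemma loopA_eq (n k : Int) (l : List Int) (d s : Int) :
    (l.foldl
      (fun (st : Int × Int) (i : Int) =>
        (if (0:Int) < PySem.Int.band n ((1:Int) <<< i.toNat) then st.1 + st.2 else st.1, st.2 * k))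
      (d, s)).1
    = d + s * (l.foldr (fun i acc => acc * k + pyBit n i.toNat) 0) := by
  induction l generalizing d s with
  | nil => simp
  | cons i t ih =>
    simp only [List.foldl_cons, List.foldr_cons]
    rw [ih]
    by_cases h : (0:Int) < PySem.Int.band n ((1:Int) <<< i.toNat)
    · have hb : pyBit n i.toNat = 1 := (cond_iff_bit n i.toNat).mp h
      rw [if_pos h, hb]
      ring
    · have hb : pyBit n i.toNat = 0 := by
        rcases bit_zero_or_one n i.toNat with h0 | h1
        · exact h0
        · exact absurd ((cond_iff_bit n i.toNat).mpr h1) h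
      rw [if_neg h, hb]
      ring

-- ===== VERDICT (by name: the statement is the Claim_ definition above) =====
theorem as_base_spec : Claim_equal_as_base := by
  intro n k bn _
  unfold Spec_as_base as_base as_base_alt
  rw [List.foldl_reverse, loopA_eq]
  simp only [zero_add, one_mul]
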